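-- pv_equiv track=rewrite | github.com/Ax31R0d/Loteria | Lotery_Pruebas1_0.py | obtener_historial_caidas
-- ===== SOURCE A (Python) =====
-- def obtener_historial_caidas(columnas, maxi):
--     caidas_columna = []
--     ultimas_posiciones = [-1] * 10
--     for i, idx in enumerate(columnas):
--         valor=int(idx)
--         if ultimas_posiciones[valor] == -1:
--             jugadas = i + 1
--         else:
--             jugadas = i - ultimas_posiciones[valor]
--         if jugadas > maxi:
--             jugadas = maxi if jugadas % 2 == 0 else (maxi - 1)
--         caidas_columna.append(jugadas)
--         ultimas_posiciones[valor] = i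
--     return caidas_columna
-- ===== SOURCE B (Python) =====
-- # Group-by-value two-pass rewrite: bucket each value's occurrence indices (length-10 table,
-- # negative values -10..-1 index from the end exactly as in A), then scatter per-bucket gaps.
-- def obtener_historial_caidas(columnas, maxi):
--     posiciones = [[] for _ in range(10)]
--     for i, idx in enumerate(columnas):
--         posiciones[int(idx)].append(i)
--     resultado = [0] * len(columnas)
--     for indices in posiciones:
--         prev = -1
--         for i in indices:
--             jugadas = i + 1 if prev == -1 else i - prev
--             if jugadas > maxi:
--                 jugadas = maxi if jugadas % 2 == 0 else maxi - 1
--             resultado[i] = jugadas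
--             prev = i
--     return resultado
-- ===== Notes on version B (the rewrite author's own statement) =====
-- stated objective: alternative
-- what changed: Replaces A's single streaming pass that maintains a last-seen-position table by a two-pass group-by: first bucket each value's occurrence indices into a 10-slot table, then scatter the (clamped) gaps per bucket into a preallocated result list.
import Mathlib
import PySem

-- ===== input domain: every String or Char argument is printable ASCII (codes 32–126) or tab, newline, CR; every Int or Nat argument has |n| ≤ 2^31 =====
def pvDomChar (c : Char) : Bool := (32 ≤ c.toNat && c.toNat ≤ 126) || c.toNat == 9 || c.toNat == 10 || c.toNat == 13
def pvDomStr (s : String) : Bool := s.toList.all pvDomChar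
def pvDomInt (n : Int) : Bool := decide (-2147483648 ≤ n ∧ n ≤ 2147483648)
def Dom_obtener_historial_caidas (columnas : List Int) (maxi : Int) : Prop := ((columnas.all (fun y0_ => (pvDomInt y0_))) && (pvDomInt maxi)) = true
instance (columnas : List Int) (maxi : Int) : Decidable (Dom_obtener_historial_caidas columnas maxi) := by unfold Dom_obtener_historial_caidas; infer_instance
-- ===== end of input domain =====

-- B re-implements A by a group-by-value two-pass (bucket occurrence indices, then scatter gaps);
-- equal return value is proved on Pre_ (all values in -10..9, exactly where A returns).

-- ===== PORT A =====
-- one loop step of A: read last position of the value, compute the clamped gap, append, update the table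
def stepA (maxi : Int) (st : List Int × List Int) (p : Int × Int) : List Int × List Int :=
  let valor := p.2                                     -- int(idx) is the identity on ints
  let pos := PySem.List.pyGetD st.2 valor 0            -- ultimas_posiciones[valor]; exact under Pre_ (index in range)
  let jugadas := if pos == -1 then p.1 + 1 else p.1 - pos
  let jugadas' := if jugadas > maxi then (if PySem.Int.mod jugadas 2 == 0 then maxi else maxi - 1) else jugadas
  (st.1 ++ [jugadas'], PySem.List.pySetD st.2 valor p.1)   -- ultimas_posiciones[valor] = i; exact under Pre_

def obtener_historial_caidas (columnas : List Int) (maxi : Int) : List Int :=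
  ((PySem.List.enumerate columnas 0).foldl (stepA maxi) ([], List.replicate 10 (-1))).1

-- ===== PORT B =====
-- pass 1 step: posiciones[int(idx)].append(i)
def appendIdx (occ : List (List Int)) (p : Int × Int) : List (List Int) :=
  PySem.List.pySetD occ p.2 (PySem.List.pyGetD occ p.2 [] ++ [p.1])  -- exact under Pre_ (index in range)

-- pass 2 inner step: gap to prev occurrence, clamp, resultado[i] = jugadas
def scanCol (maxi : Int) (st : List Int × Int) (i : Int) : List Int × Int :=
  let jugadas := if st.2 == -1 then i + 1 else i - st.2
  let jugadas' := if jugadas > maxi then (if PySem.Int.mod jugadas 2 == 0 then maxi else maxi - 1) else jugadas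
  (PySem.List.pySetD st.1 i jugadas', i)               -- i ≥ 0 here, plain in-range assignment

def obtener_historial_caidas_alt (columnas : List Int) (maxi : Int) : List Int :=
  let posiciones := (PySem.List.enumerate columnas 0).foldl appendIdx (List.replicate 10 [])
  posiciones.foldl
    (fun res indices => ((indices.foldl (scanCol maxi) (res, -1)).1))
    (List.replicate columnas.length (0 : Int))

-- ===== PRECONDITION & SPEC =====
-- Pre_ excludes exactly the inputs on which A raises IndexError: some value outside -10..9.
def Pre_obtener_historial_caidas (columnas : List Int) (_maxi : Int) : Prop :=
  ∀ v ∈ columnas, -10 ≤ v ∧ v ≤ 9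
instance (columnas : List Int) (maxi : Int) : Decidable (Pre_obtener_historial_caidas columnas maxi) := by
  unfold Pre_obtener_historial_caidas; infer_instance

def pvWitness_obtener_historial_caidas : List Int × Int := ([3, 7, 3, 0, 3, -7], 4)

def Spec_obtener_historial_caidas (columnas : List Int) (maxi : Int) (out : List Int) : Prop := out = obtener_historial_caidas_alt columnas maxi
instance (columnas : List Int) (maxi : Int) (out : List Int) : Decidable (Spec_obtener_historial_caidas columnas maxi out) := by unfold Spec_obtener_historial_caidas; infer_instance

-- ===== CLAIM (what is proved, stated in full; the proofs are below) =====
def Claim_equal_obtener_historial_caidas : Prop := ∀ (columnas : List Int) (maxi : Int), Dom_obtener_historial_caidas columnas maxi → Pre_obtener_historial_caidas columnas maxi → Spec_obtener_historial_caidas columnas maxi (obtener_historial_caidas columnas maxi)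

-- ===== LEMMAS AND PROOFS =====

-- the array slot a value v ∈ -10..9 resolves to in a length-10 Python list
def slotN (v : Int) : Nat := if v < 0 then (v + 10).toNat else v.toNat
-- the common clamp of both programs
def clampv (maxi j : Int) : Int := if j > maxi then (if PySem.Int.mod j 2 == 0 then maxi else maxi - 1) else j
def slotD (vals : List Int) (k : Nat) : Nat := slotN (vals.getD k 0)
-- indices of vals whose value resolves to slot s, in increasing order
def occs (vals : List Int) (s : Nat) : List Nat := (List.range vals.length).filter (fun j => slotD vals j == s)
-- last such index, -1 if none
def lastOcc (vals : List Int) (s : Nat) : Int := ((occs vals s).map Int.ofNat).getLastD (-1)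
-- the common per-position specification of both programs
def specv (vals : List Int) (maxi : Int) (k : Nat) : Int :=
  clampv maxi ((k : Int) - lastOcc (vals.take k) (slotD vals k))
-- last element of lst below k, default p
def prevIn (lst : List Nat) (p : Int) (k : Nat) : Int := ((lst.filter (fun j => j < k)).map Int.ofNat).getLastD p

theorem gap_if (p i : Int) : (if p == -1 then i + 1 else i - p) = i - p := by
  by_cases h : p = -1
  · subst h; simp
  · simp [h]

theorem pyGetD_ten {α : Type} (xs : List α) (h : xs.length = 10) (v : Int)
    (h1 : -10 ≤ v) (h2 : v ≤ 9) (d : α) :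
    PySem.List.pyGetD xs v d = xs.getD (slotN v) d := by
  unfold PySem.List.pyGetD PySem.List.pyGet? PySem.List.pyIdx? slotN
  rcases lt_or_ge v 0 with hv | hv
  · rw [if_neg (by omega : ¬ 0 ≤ v), if_pos (by omega : -(xs.length:Int) ≤ v), if_pos hv]
    have : xs.length - (-v).toNat = (v + 10).toNat := by omega
    rw [this]; simp [List.getD]
  · rw [if_pos hv, if_pos (by omega : v < (xs.length:Int)), if_neg (by omega : ¬ v < 0)]
    simp [List.getD]

theorem pySetD_ten {α : Type} (xs : List α) (h : xs.length = 10) (v : Int)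
    (h1 : -10 ≤ v) (h2 : v ≤ 9) (a : α) :
    PySem.List.pySetD xs v a = xs.set (slotN v) a := by
  unfold PySem.List.pySetD PySem.List.pySet? PySem.List.pyIdx? slotN
  rcases lt_or_ge v 0 with hv | hv
  · rw [if_neg (by omega : ¬ 0 ≤ v), if_pos (by omega : -(xs.length:Int) ≤ v), if_pos hv]
    simp only [Option.map_some, Option.getD_some]
    congr 1; omega
  · rw [if_pos hv, if_pos (by omega : v < (xs.length:Int)), if_neg (by omega : ¬ v < 0)]
    simp

theorem slotN_lt (v : Int) (h1 : -10 ≤ v) (h2 : v ≤ 9) : slotN v < 10 := by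
  unfold slotN; split <;> omega

theorem getD_map_range10 {α : Type} (f : Nat → α) (s : Nat) (hs : s < 10) (d : α) :
    ((List.range 10).map f).getD s d = f s := by
  rw [List.getD_eq_getElem _ _ (by simpa using hs)]
  simp

theorem set_map_range10 {α : Type} (f : Nat → α) (t : Nat) (_ht : t < 10) (x : α) :
    ((List.range 10).map f).set t x = (List.range 10).map (fun s => if s = t then x else f s) := by
  apply List.ext_getElem
  · simp
  · intro k hk _
    have hk10 : k < 10 := by simpa using hk
    by_cases hkt : k = t
    · simp [hkt]
    · simp only [List.getElem_set, List.getElem_map, List.getElem_range]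
      rw [if_neg (fun h => hkt h.symm)]
      simp [hkt]

theorem slotD_append (ys : List Int) (v : Int) (k : Nat) (hk : k < ys.length) :
    slotD (ys ++ [v]) k = slotD ys k := by
  unfold slotD
  rw [List.getD_eq_getElem _ _ (by simp; omega), List.getD_eq_getElem _ _ hk,
    List.getElem_append_left hk]

theorem occs_snoc (ys : List Int) (v : Int) (s : Nat) :
    occs (ys ++ [v]) s = occs ys s ++ (if slotN v = s then [ys.length] else []) := by
  unfold occs
  rw [List.length_append, List.length_singleton, List.range_succ, List.filter_append]
  congr 1
  · apply List.filter_congr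
    intro j hj
    rw [slotD_append ys v j (List.mem_range.mp hj)]
  · have hsd : slotD (ys ++ [v]) ys.length = slotN v := by
      unfold slotD
      rw [List.getD_eq_getElem _ _ (by simp)]
      simp
    by_cases h : slotN v = s <;> simp [hsd, h]

theorem lastOcc_snoc (ys : List Int) (v : Int) (s : Nat) :
    lastOcc (ys ++ [v]) s = if s = slotN v then (ys.length : Int) else lastOcc ys s := by
  unfold lastOcc
  rw [occs_snoc]
  by_cases h : slotN v = s
  · simp [h.symm]
  · have : ¬ s = slotN v := fun hh => h hh.symm
    simp [h, this]

theorem lastOcc_nil (s : Nat) : lastOcc [] s = -1 := by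
  simp [lastOcc, occs]

-- characterisation of A's fold: output is the per-position spec, table holds last occurrences
theorem A_fold (maxi : Int) (ys : List Int) (hys : ∀ v ∈ ys, -10 ≤ v ∧ v ≤ 9) :
    (PySem.List.enumerate ys 0).foldl (stepA maxi) ([], List.replicate 10 (-1))
      = ((List.range ys.length).map (specv ys maxi), (List.range 10).map (lastOcc ys)) := by
  induction ys using List.reverseRecOn with
  | nil =>
      simp [PySem.List.enumerate]
      rw [show (List.range 10).map (lastOcc []) = (List.range 10).map (fun _ => (-1 : Int)) from
        List.map_congr_left (fun s _ => lastOcc_nil s)]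
      simp [List.map_const']
  | append_singleton ys v ih =>
      have hys' : ∀ w ∈ ys, -10 ≤ w ∧ w ≤ 9 := fun w hw => hys w (by simp [hw])
      have hv : -10 ≤ v ∧ v ≤ 9 := hys v (by simp)
      rw [PySem.List.enumerate_append, List.foldl_append, ih hys']
      have hlen : ((List.range 10).map (lastOcc ys)).length = 10 := by simp
      have hstep : stepA maxi ((List.range ys.length).map (specv ys maxi), (List.range 10).map (lastOcc ys))
          ((0 : Int) + ys.length, v)
          = ((List.range ys.length).map (specv ys maxi) ++ [clampv maxi ((ys.length : Int) - lastOcc ys (slotN v))],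
             ((List.range 10).map (lastOcc ys)).set (slotN v) (0 + ys.length)) := by
        unfold stepA
        dsimp only
        rw [pyGetD_ten _ hlen v hv.1 hv.2, pySetD_ten _ hlen v hv.1 hv.2,
          getD_map_range10 _ _ (slotN_lt v hv.1 hv.2)]
        simp only [gap_if, clampv, zero_add]
      simp only [PySem.List.enumerate_cons, PySem.List.enumerate_nil, List.foldl_cons, List.foldl_nil]
      rw [hstep]
      simp only [Prod.mk.injEq]
      constructor
      · -- output component
        rw [List.length_append, List.length_singleton, List.range_succ, List.map_append]
        congr 1
        · apply List.map_congr_left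
          intro k hk
          have hk' : k < ys.length := List.mem_range.mp hk
          unfold specv
          rw [slotD_append ys v k hk', List.take_append_of_le_length (by omega)]
        · simp only [List.map_cons, List.map_nil]
          congr 1
          unfold specv slotD
          rw [List.take_left, List.getD_eq_getElem _ _ (by simp)]
          simp
      · -- table component
        rw [set_map_range10 _ _ (slotN_lt v hv.1 hv.2)]
        apply List.map_congr_left
        intro s _
        rw [lastOcc_snoc]
        by_cases h : s = slotN v <;> simp [h]

-- characterisation of B's first pass: the bucket table of occurrence indices
theorem B_group (ys : List Int) (hys : ∀ v ∈ ys, -10 ≤ v ∧ v ≤ 9) :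
    (PySem.List.enumerate ys 0).foldl appendIdx (List.replicate 10 ([] : List Int))
      = (List.range 10).map (fun s => (occs ys s).map Int.ofNat) := by
  induction ys using List.reverseRecOn with
  | nil =>
      simp [PySem.List.enumerate, occs, List.map_const']
  | append_singleton ys v ih =>
      have hys' : ∀ w ∈ ys, -10 ≤ w ∧ w ≤ 9 := fun w hw => hys w (by simp [hw])
      have hv : -10 ≤ v ∧ v ≤ 9 := hys v (by simp)
      rw [PySem.List.enumerate_append, List.foldl_append, ih hys']
      simp only [PySem.List.enumerate_cons, PySem.List.enumerate_nil, List.foldl_cons, List.foldl_nil]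
      have hlen : ((List.range 10).map (fun s => (occs ys s).map Int.ofNat)).length = 10 := by simp
      unfold appendIdx
      dsimp only
      rw [pyGetD_ten _ hlen v hv.1 hv.2, pySetD_ten _ hlen v hv.1 hv.2,
        getD_map_range10 _ _ (slotN_lt v hv.1 hv.2),
        set_map_range10 _ _ (slotN_lt v hv.1 hv.2)]
      apply List.map_congr_left
      intro s _
      rw [occs_snoc, List.map_append]
      by_cases h : s = slotN v
      · simp [h.symm]
      · have h2 : ¬ slotN v = s := fun hh => h hh.symm
        simp [h, h2]

-- the inner scan writes the gap value at each listed position and touches nothing else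
theorem scan_one (maxi : Int) (lst : List Nat) (res : List Int) (p : Int)
    (hpair : lst.Pairwise (· < ·)) (hlt : ∀ j ∈ lst, j < res.length)
    (hp : ∀ j ∈ lst, p < (j : Int)) :
    (((lst.map Int.ofNat).foldl (scanCol maxi) (res, p)).1.length = res.length) ∧
    (∀ k, k < res.length →
      ((lst.map Int.ofNat).foldl (scanCol maxi) (res, p)).1.getD k 0
        = if k ∈ lst then clampv maxi ((k : Int) - prevIn lst p k) else res.getD k 0) := by
  induction lst generalizing res p with
  | nil => simp
  | cons j rest ih =>
      have hjlt : j < res.length := hlt j (by simp)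
      have hstep : scanCol maxi (res, p) (Int.ofNat j)
          = (res.set j (clampv maxi ((j : Int) - p)), (j : Int)) := by
        unfold scanCol
        simp only [gap_if, clampv]
        simp [PySem.List.pySetD_natCast]
      have hrest_lt : ∀ i ∈ rest, i < (res.set j (clampv maxi ((j : Int) - p))).length := by
        intro i hi; rw [List.length_set]; exact hlt i (by simp [hi])
      have hrest_gt : ∀ i ∈ rest, (j : Int) < (i : Int) := by
        intro i hi
        exact_mod_cast (List.pairwise_cons.mp hpair).1 i hi
      obtain ⟨ihlen, ihval⟩ := ih (res.set j (clampv maxi ((j : Int) - p))) (j : Int)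
        (List.pairwise_cons.mp hpair).2 hrest_lt hrest_gt
      rw [List.map_cons, List.foldl_cons, hstep]
      refine ⟨by rw [ihlen, List.length_set], ?_⟩
      intro k hk
      rw [ihval k (by rwa [List.length_set])]
      by_cases hkr : k ∈ rest
      · have hjk : j < k := by
          have := (List.pairwise_cons.mp hpair).1 k hkr; omega
        have hprev : prevIn (j :: rest) p k = prevIn rest (j : Int) k := by
          unfold prevIn
          rw [List.filter_cons_of_pos (by simpa using hjk), List.map_cons, List.getLastD_cons]
          norm_cast
        rw [if_pos hkr, if_pos (List.mem_cons_of_mem j hkr), hprev]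
      · by_cases hkj : k = j
        · subst hkj
          have hprev : prevIn (k :: rest) p k = p := by
            unfold prevIn
            rw [List.filter_cons_of_neg (by simp)]
            have : rest.filter (fun j => j < k) = [] := by
              rw [List.filter_eq_nil_iff]
              intro a ha
              have := (List.pairwise_cons.mp hpair).1 a ha
              simp; omega
            rw [this]
            rfl
          rw [if_neg hkr, if_pos (List.mem_cons_self), hprev]
          rw [List.getD_eq_getElem _ _ (by rwa [List.length_set]), List.getElem_set_self]
        · rw [if_neg hkr, if_neg (by simp [hkj, hkr]),
            List.getD_eq_getElem _ _ (by rwa [List.length_set]),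
            List.getElem_set_ne (by omega), ← List.getD_eq_getElem _ _ hk]
  
theorem occs_pairwise (vals : List Int) (s : Nat) : (occs vals s).Pairwise (· < ·) :=
  List.Pairwise.sublist List.filter_sublist List.pairwise_lt_range

theorem occs_lt (vals : List Int) (s : Nat) : ∀ j ∈ occs vals s, j < vals.length := by
  intro j hj
  have := List.mem_of_mem_filter hj
  simpa using this

theorem range_filter_lt (n k : Nat) (hk : k ≤ n) :
    (List.range n).filter (fun j => j < k) = List.range k := by
  induction n with
  | zero => have : k = 0 := by omega
            simp [this]
  | succ m ih =>
      rw [List.range_succ, List.filter_append]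
      by_cases h : k = m + 1
      · subst h
        rw [List.filter_eq_self.mpr (by intro a ha; simp at ha ⊢; omega)]
        simp [List.range_succ]
      · have hk' : k ≤ m := by omega
        rw [ih hk']
        simp; omega

theorem occs_take (vals : List Int) (s : Nat) (k : Nat) (hk : k ≤ vals.length) :
    occs (vals.take k) s = (occs vals s).filter (fun j => j < k) := by
  unfold occs
  rw [List.filter_filter]
  have hlen : (vals.take k).length = k := by simp; omega
  rw [hlen, ← range_filter_lt vals.length k hk, List.filter_filter]
  apply List.filter_congr
  intro j hj
  have hjn : j < vals.length := by simpa using hj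
  by_cases hjk : j < k
  · have : slotD (vals.take k) j = slotD vals j := by
      unfold slotD
      rw [List.getD_eq_getElem _ _ (by omega : j < (vals.take k).length),
        List.getD_eq_getElem _ _ hjn, List.getElem_take]
    simp [hjk, this]
  · simp [hjk]

theorem prevIn_occs (vals : List Int) (s k : Nat) (hk : k < vals.length) :
    prevIn (occs vals s) (-1) k = lastOcc (vals.take k) s := by
  unfold prevIn lastOcc
  rw [occs_take vals s k (by omega)]

-- folding the scan over a set of slots fills exactly those slots' positions with the spec
theorem scatter_go (maxi : Int) (vals : List Int) (slots : List Nat) (cur : List Int)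
    (hlen : cur.length = vals.length) :
    ((slots.foldl (fun c s => (((occs vals s).map Int.ofNat).foldl (scanCol maxi) (c, -1)).1) cur).length = vals.length) ∧
    (∀ k, k < vals.length →
      (slots.foldl (fun c s => (((occs vals s).map Int.ofNat).foldl (scanCol maxi) (c, -1)).1) cur).getD k 0
        = if slotD vals k ∈ slots then specv vals maxi k else cur.getD k 0) := by
  induction slots generalizing cur with
  | nil => exact ⟨hlen, fun k _ => by simp⟩
  | cons s rest ih =>
      obtain ⟨slen, sval⟩ := scan_one maxi (occs vals s) cur (-1) (occs_pairwise vals s)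
        (fun j hj => by rw [hlen]; exact occs_lt vals s j hj)
        (fun j _ => by omega)
      obtain ⟨ihlen, ihval⟩ := ih ((((occs vals s).map Int.ofNat).foldl (scanCol maxi) (cur, -1)).1)
        (by rw [slen, hlen])
      rw [List.foldl_cons]
      refine ⟨ihlen, ?_⟩
      intro k hk
      rw [ihval k hk, sval k (by omega)]
      have hmem : k ∈ occs vals s ↔ slotD vals k = s := by
        unfold occs
        simp [List.mem_filter, List.mem_range, hk]
      by_cases hr : slotD vals k ∈ rest
      · simp [hr]
      · by_cases hs : slotD vals k = s
        · have hko : k ∈ occs vals s := hmem.mpr hs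
          rw [if_neg hr, if_pos (hmem.mpr hs), if_pos (by simp [hs])]
          unfold specv
          rw [prevIn_occs vals s k hk, hs]
        · have hko : k ∉ occs vals s := fun h => hs (hmem.mp h)
          have : slotD vals k ∉ s :: rest := by simp [hs, hr]
          simp [hko, hr, this]

theorem A_eq (columnas : List Int) (maxi : Int) (h : ∀ v ∈ columnas, -10 ≤ v ∧ v ≤ 9) :
    obtener_historial_caidas columnas maxi = (List.range columnas.length).map (specv columnas maxi) := by
  unfold obtener_historial_caidas
  rw [A_fold maxi columnas h]

theorem B_eq (columnas : List Int) (maxi : Int) (h : ∀ v ∈ columnas, -10 ≤ v ∧ v ≤ 9) :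
    obtener_historial_caidas_alt columnas maxi = (List.range columnas.length).map (specv columnas maxi) := by
  unfold obtener_historial_caidas_alt
  rw [B_group columnas h, List.foldl_map]
  obtain ⟨hl, hv⟩ := scatter_go maxi columnas (List.range 10)
    (List.replicate columnas.length (0 : Int)) (by simp)
  apply List.ext_getElem
  · rw [hl]; simp
  · intro k hk1 hk2
    have hk : k < columnas.length := by rwa [hl] at hk1
    have hslot : slotD columnas k ∈ List.range 10 := by
      have hmem : columnas.getD k 0 ∈ columnas := by
        rw [List.getD_eq_getElem _ _ hk]; exact List.getElem_mem hk
      have := h _ hmem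
      simpa [slotD] using slotN_lt _ this.1 this.2
    have := hv k hk
    rw [if_pos hslot] at this
    rw [← List.getD_eq_getElem _ 0 hk1, this]
    simp

-- ===== VERDICT (by name: the statement is the Claim_ definition above) =====
theorem obtener_historial_caidas_spec : Claim_equal_obtener_historial_caidas := by
  intro columnas maxi _ hpre
  unfold Spec_obtener_historial_caidas
  rw [A_eq columnas maxi hpre, B_eq columnas maxi hpre]
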